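-- pv_equiv track=rewrite | github.com/Tadoya/cnu-kakao | cnucrawling/meal_crawl.py | make_menu_ilpum
-- ===== SOURCE A (Python) =====
-- def make_menu_ilpum(data):
--     i=0;
--     iscontinue=False
--     str='\t'
--     for key in data.split():
--         if key =='(pork' or key=='(beef' or key=='null':
--             continue
--         elif key == 'included)':
--             iscontinue=True
--             continue
--         elif iscontinue == True:
--             iscontinue=False
--             continue
--
--         if i%2==1:
--             str += key+'원\n\t'
--         else :
--             str += key+'\t'
--         i += 1
--
--     return str
-- ===== SOURCE B (Python) =====
-- def make_menu_ilpum(data):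
--     # stage 1: drop the unconditional noise tokens
--     toks = [t for t in data.split() if t not in ('(pork', '(beef', 'null')]
--     # stage 2: each maximal marker run deletes itself plus the one token after it
--     kept = []
--     i, n = 0, len(toks)
--     while i < n:
--         if toks[i] == 'included)':
--             while i < n and toks[i] == 'included)':
--                 i += 1
--             i += 1  # the token consumed by the run (if any)
--         else:
--             kept.append(toks[i])
--             i += 1
--     # stage 3: emit survivors two at a time
--     out = '\t'
--     for j in range(0, len(kept) - 1, 2):
--         out += kept[j] + '\t' + kept[j + 1] + '원\n\t'
--     if len(kept) % 2 == 1: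
--         out += kept[-1] + '\t'
--     return out
-- ===== Notes on version B (the rewrite author's own statement) =====
-- stated objective: alternative
-- what changed: Replaces A's single interleaved loop (parity counter, skip flag, inline concatenation) by three staged passes: a comprehension dropping the noise tokens, an index walk that deletes each maximal marker-token run together with the one token after it (no boolean flag), and a pair-at-a-time emit loop (step-2 range plus odd-leftover case) instead of parity arithmetic.
import Mathlib
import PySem

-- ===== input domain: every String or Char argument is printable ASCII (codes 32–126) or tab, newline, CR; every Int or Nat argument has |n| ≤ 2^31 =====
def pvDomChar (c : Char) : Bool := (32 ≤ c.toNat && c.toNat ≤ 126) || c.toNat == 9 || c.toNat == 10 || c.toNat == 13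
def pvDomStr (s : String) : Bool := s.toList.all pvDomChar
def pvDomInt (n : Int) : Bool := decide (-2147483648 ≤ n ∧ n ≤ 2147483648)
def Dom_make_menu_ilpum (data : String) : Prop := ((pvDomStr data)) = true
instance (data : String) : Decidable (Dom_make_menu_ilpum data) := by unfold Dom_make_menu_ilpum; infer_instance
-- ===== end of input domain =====

-- B restructures A's interleaved flag-and-parity loop into three staged passes:
-- drop noise tokens, delete each marker-token run plus its following token, emit pairs (objective: alternative).

-- ===== PORT A =====
-- loop state: (i, iscontinue, str as List Char); string concatenation ported via List Char (exact)
def pvAStep (st : Int × Bool × List Char) (key : String) : Int × Bool × List Char :=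
  if key = "(pork" ∨ key = "(beef" ∨ key = "null" then st
  else if key = "included)" then (st.1, true, st.2.2)
  else if st.2.1 = true then (st.1, false, st.2.2)
  else if st.1 % 2 = 1 then (st.1 + 1, st.2.1, st.2.2 ++ key.toList ++ ['원', '\n', '\t'])
  else (st.1 + 1, st.2.1, st.2.2 ++ key.toList ++ ['\t'])

def make_menu_ilpum (data : String) : String :=
  String.mk ((PySem.Str.split₀ data).foldl pvAStep (0, false, ['\t'])).2.2

-- ===== PORT B =====
-- stage 1: the 'not in' test of the comprehension
def pvNoise (t : String) : Bool := !(t == "(pork" || t == "(beef" || t == "null")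

-- stage 2: the index walk ported as mutual recursion (inner while = pvBRun)
mutual
def pvBDrop : List String → List String
  | [] => []
  | t :: ts => if t = "included)" then pvBRun ts else t :: pvBDrop ts
def pvBRun : List String → List String
  | [] => []
  | t :: ts => if t = "included)" then pvBRun ts else pvBDrop ts
end

-- stage 3: emit two survivors at a time; odd leftover gets a lone '\t'
def pvBPairs : List String → List Char
  | a :: b :: rest => a.toList ++ '\t' :: (b.toList ++ '원' :: '\n' :: '\t' :: pvBPairs rest)
  | [a] => a.toList ++ ['\t']
  | [] => []

def make_menu_ilpum_alt (data : String) : String :=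
  let toks := (PySem.Str.split₀ data).filter pvNoise
  String.mk ('\t' :: pvBPairs (pvBDrop toks))

-- ===== PRECONDITION & SPEC =====
def Spec_make_menu_ilpum (data : String) (out : String) : Prop := out = make_menu_ilpum_alt data
instance (data : String) (out : String) : Decidable (Spec_make_menu_ilpum data out) := by unfold Spec_make_menu_ilpum; infer_instance

-- ===== CLAIM =====
def Claim_equal_make_menu_ilpum : Prop := ∀ (data : String), Dom_make_menu_ilpum data → Spec_make_menu_ilpum data (make_menu_ilpum data)

-- ===== LEMMAS AND PROOFS =====

-- proof-side reference: A's filter (flag semantics) and A's formatter (parity semantics)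
def pvAFilter (c : Bool) : List String → List String
  | [] => []
  | t :: ts =>
    if t = "(pork" ∨ t = "(beef" ∨ t = "null" then pvAFilter c ts
    else if t = "included)" then pvAFilter true ts
    else if c = true then pvAFilter false ts
    else t :: pvAFilter c ts

def pvFmt (i : Int) : List String → List Char
  | [] => []
  | k :: ks => k.toList ++ (if i % 2 = 1 then ['원', '\n', '\t'] else ['\t']) ++ pvFmt (i + 1) ks

theorem pvA_fold_eq (ts : List String) : ∀ (i : Int) (c : Bool) (acc : List Char),
    (ts.foldl pvAStep (i, c, acc)).2.2 = acc ++ pvFmt i (pvAFilter c ts) := by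
  induction ts with
  | nil => intro i c acc; simp [pvFmt, pvAFilter]
  | cons t ts ih =>
    intro i c acc
    by_cases hs : t = "(pork" ∨ t = "(beef" ∨ t = "null"
    · simp [List.foldl, pvAStep, pvAFilter, hs, ih]
    · by_cases hi : t = "included)"
      · simp [List.foldl, pvAStep, pvAFilter, hi, ih]
      · cases c with
        | true => simp [List.foldl, pvAStep, pvAFilter, hs, hi, ih]
        | false =>
          by_cases hp : i % 2 = 1 <;>
            simp [List.foldl, pvAStep, pvAFilter, hs, hi, hp, ih, pvFmt]

-- B's stage-1+2 composition equals A's flag filter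
theorem pvB_filter_eq (ts : List String) :
    pvBDrop (ts.filter pvNoise) = pvAFilter false ts
    ∧ pvBRun (ts.filter pvNoise) = pvAFilter true ts := by
  induction ts with
  | nil => simp [pvBDrop, pvBRun, pvAFilter]
  | cons t ts ih =>
    by_cases hs : t = "(pork" ∨ t = "(beef" ∨ t = "null"
    · have hn : pvNoise t = false := by rcases hs with h | h | h <;> simp [pvNoise, h]
      simp only [List.filter_cons, hn, Bool.false_eq_true, if_false]
      simpa [pvAFilter, hs] using ih
    · have hn : pvNoise t = true := by simp [pvNoise]; tauto
      simp only [List.filter_cons, hn, if_true]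
      by_cases hi : t = "included)"
      · simp [pvAFilter, pvBDrop, pvBRun, hs, hi, ih.2]
      · simp [pvAFilter, pvBDrop, pvBRun, hs, hi, ih.1, ih.2]

-- B's pair emitter equals A's parity formatter started at an even index
theorem pvBPairs_eq (ks : List String) : ∀ (i : Int), i % 2 = 0 → pvBPairs ks = pvFmt i ks := by
  induction ks using pvBPairs.induct with
  | case1 a b rest ih =>
    intro i hi
    have h1 : (i + 1) % 2 = 1 := by omega
    have h2 : (i + 1 + 1) % 2 = 0 := by omega
    have hne : ¬ (i % 2 = 1) := by omega
    simp [pvBPairs, pvFmt, hne, h1, ih _ h2]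
  | case2 a =>
    intro i hi
    have hne : ¬ (i % 2 = 1) := by omega
    simp [pvBPairs, pvFmt, hne]
  | case3 => intro i _; simp [pvBPairs, pvFmt]

-- ===== VERDICT =====
theorem make_menu_ilpum_spec : Claim_equal_make_menu_ilpum := by
  intro data _
  simp only [Spec_make_menu_ilpum, make_menu_ilpum, make_menu_ilpum_alt]
  rw [pvA_fold_eq, (pvB_filter_eq _).1, pvBPairs_eq _ 0 (by decide)]
  rfl
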